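-- pv_equiv track=rewrite | github.com/pushpa-info-14/python-programming | LeetCode/3750-4000/Q3873 Maximum Points Activated with One Addition.py | maxActivated
-- ===== SOURCE A (Python) =====
-- class DisjointSet:
--     def __init__(self, n):
--         self.size = [1] * (n + 1)
--         self.parent = list(range(n + 1))
--
--     def findParent(self, x):
--         if x != self.parent[x]:
--             self.parent[x] = self.findParent(self.parent[x])
--         return self.parent[x]
--
--     def union(self, x, y):
--         x = self.findParent(x)
--         y = self.findParent(y)
--         if x != y:
--             if self.size[x] < self.size[y]:
--                 self.parent[x] = y
--                 self.size[y] += self.size[x]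
--             else:
--                 self.parent[y] = x
--                 self.size[x] += self.size[y]
--
-- def maxActivated(points: list[list[int]]) -> int:
--     x_map = {}
--     y_map = {}
--     n = len(points)
--     ds = DisjointSet(n)
--     for i in range(n):
--         x = points[i][0]
--         y = points[i][1]
--         if x in x_map:
--             ds.union(i, x_map[x])
--         else:
--             x_map[x] = i
--         if y in y_map:
--             ds.union(i, y_map[y])
--         else:
--             y_map[y] = i
--     comp = [0] * n
--     for i in range(n):
--         comp[ds.findParent(i)] += 1
--     comp.sort(reverse=True)
--
--     if len(comp) < 2:
--         return n + 1
--     return comp[0] + comp[1] + 1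
-- ===== SOURCE B (Python) =====
-- def maxActivated(points: list[list[int]]) -> int:
--     n = len(points)
--     label = list(range(n))
--     xm = {}
--     ym = {}
--     for i in range(n):
--         x = points[i][0]
--         y = points[i][1]
--         if x in xm:
--             a, b = label[xm[x]], label[i]
--             if a != b:
--                 label = [a if v == b else v for v in label]
--         else:
--             xm[x] = i
--         if y in ym:
--             a, b = label[ym[y]], label[i]
--             if a != b:
--                 label = [a if v == b else v for v in label]
--         else:
--             ym[y] = i
--     cnt = {}
--     for v in label:
--         cnt[v] = cnt.get(v, 0) + 1
--     sizes = sorted(cnt.values(), reverse=True)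
--     first = sizes[0] if sizes else 0
--     second = sizes[1] if len(sizes) > 1 else 0
--     return first + second + 1
-- ===== Notes on version B (the rewrite author's own statement) =====
-- stated objective: simpler
-- what changed: Replaces the DisjointSet class (recursive find with path compression, union by size, per-root count array padded with zeros) by a flat component-label list merged by relabelling, with a dict counter and a padded top-two sum at the end.
import Mathlib
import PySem

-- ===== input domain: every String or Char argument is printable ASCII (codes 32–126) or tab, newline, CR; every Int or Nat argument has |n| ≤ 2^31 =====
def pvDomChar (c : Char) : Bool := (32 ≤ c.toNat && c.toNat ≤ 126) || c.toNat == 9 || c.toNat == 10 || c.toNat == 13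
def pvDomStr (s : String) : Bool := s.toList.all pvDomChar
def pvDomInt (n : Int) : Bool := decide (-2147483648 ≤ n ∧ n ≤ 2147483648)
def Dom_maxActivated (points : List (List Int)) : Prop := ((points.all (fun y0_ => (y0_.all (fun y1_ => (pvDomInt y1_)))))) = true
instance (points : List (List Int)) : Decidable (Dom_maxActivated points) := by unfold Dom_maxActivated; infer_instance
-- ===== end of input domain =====

-- B replaces A's union-find forest (path compression, union by size) by a flat component-label
-- array merged by relabelling, and a dict counter with a padded top-two sum; objective: simpler.

-- ===== PORT A =====
-- DisjointSet.findParent: recursive with path compression; `fuel` is only a termination guard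
-- (callers pass 2*n+2, which exceeds any parent-chain length that can arise), the computation is A's.
def dsFind (fuel : Nat) (p : List Nat) (x : Nat) : List Nat × Nat :=
  match fuel with
  | 0 => (p, x)
  | f + 1 =>
    let px := p.getD x 0
    if x ≠ px then
      let res := dsFind f p px
      (res.1.set x res.2, res.2)
    else (p, x)

-- DisjointSet.union
def dsUnion (fuel : Nat) (sz : List Int) (p : List Nat) (x y : Nat) : List Int × List Nat :=
  let fx := dsFind fuel p x
  let fy := dsFind fuel fx.1 y
  let p2 := fy.1
  let rx := fx.2
  let ry := fy.2
  if rx ≠ ry then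
    if sz.getD rx 0 < sz.getD ry 0 then
      (sz.set ry (sz.getD ry 0 + sz.getD rx 0), p2.set rx ry)
    else
      (sz.set rx (sz.getD rx 0 + sz.getD ry 0), p2.set ry rx)
  else (sz, p2)

-- body of A's first loop (`for i in range(n)`), as a named helper
def aBody (points : List (List Int)) (fuel : Nat)
    (st : PySem.Dict Int Nat × PySem.Dict Int Nat × List Int × List Nat) (i : Nat) :
    PySem.Dict Int Nat × PySem.Dict Int Nat × List Int × List Nat :=
  let x := (points.getD i []).getD 0 0
  let y := (points.getD i []).getD 1 0
  let st1 :=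
    if st.1.contains x then
      let up := dsUnion fuel st.2.2.1 st.2.2.2 i (st.1.getD x 0)
      (st.1, st.2.1, up.1, up.2)
    else (st.1.insert x i, st.2.1, st.2.2.1, st.2.2.2)
  if st1.2.1.contains y then
    let up := dsUnion fuel st1.2.2.1 st1.2.2.2 i (st1.2.1.getD y 0)
    (st1.1, st1.2.1, up.1, up.2)
  else (st1.1, st1.2.1.insert y i, st1.2.2.1, st1.2.2.2)

-- body of A's second loop (`comp[ds.findParent(i)] += 1`)
def aCompBody (fuel : Nat) (cp : List Nat × List Int) (i : Nat) : List Nat × List Int :=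
  let f := dsFind fuel cp.1 i
  (f.1, cp.2.set f.2 (cp.2.getD f.2 0 + 1))

def maxActivated (points : List (List Int)) : Int :=
  let n := points.length
  let fuel := 2 * n + 2
  let st := (List.range n).foldl (aBody points fuel)
    (PySem.Dict.empty, PySem.Dict.empty, List.replicate (n + 1) (1 : Int), List.range (n + 1))
  let cp := (List.range n).foldl (aCompBody fuel) (st.2.2.2, List.replicate n (0 : Int))
  let comp := PySem.List.sorted cp.2 (fun v => v) true
  if comp.length < 2 then (n : Int) + 1
  else comp.getD 0 0 + comp.getD 1 0 + 1

-- ===== PORT B =====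
-- merge two component labels: rewrite every occurrence of label[i]'s label into label[m]'s label
def bMerge (lab : List Nat) (m i : Nat) : List Nat :=
  let a := lab.getD m 0
  let b := lab.getD i 0
  if a ≠ b then lab.map (fun v => if v = b then a else v) else lab

-- body of B's loop, as a named helper
def bBody (points : List (List Int))
    (st : PySem.Dict Int Nat × PySem.Dict Int Nat × List Nat) (i : Nat) :
    PySem.Dict Int Nat × PySem.Dict Int Nat × List Nat :=
  let x := (points.getD i []).getD 0 0
  let y := (points.getD i []).getD 1 0
  let st1 :=
    if st.1.contains x then (st.1, st.2.1, bMerge st.2.2 (st.1.getD x 0) i)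
    else (st.1.insert x i, st.2.1, st.2.2)
  if st1.2.1.contains y then (st1.1, st1.2.1, bMerge st1.2.2 (st1.2.1.getD y 0) i)
  else (st1.1, st1.2.1.insert y i, st1.2.2)

def maxActivated_alt (points : List (List Int)) : Int :=
  let n := points.length
  let st := (List.range n).foldl (bBody points) (PySem.Dict.empty, PySem.Dict.empty, List.range n)
  let cnt := st.2.2.foldl (fun (d : PySem.Dict Nat Int) v => d.insert v (d.getD v 0 + 1)) PySem.Dict.empty
  let sizes := PySem.List.sorted cnt.values (fun v => v) true
  let first := if 0 < sizes.length then sizes.getD 0 0 else 0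
  let second := if 1 < sizes.length then sizes.getD 1 0 else 0
  first + second + 1

-- ===== PRECONDITION & SPEC =====
-- Pre_ excludes points with fewer than 2 coordinates: both A and B raise IndexError there.
def Pre_maxActivated (points : List (List Int)) : Prop := ∀ pt ∈ points, 2 ≤ pt.length
instance (points : List (List Int)) : Decidable (Pre_maxActivated points) := by
  unfold Pre_maxActivated; infer_instance
def pvWitness_maxActivated : List (List Int) := [[0, 0], [0, 1], [2, 1]]

def Spec_maxActivated (points : List (List Int)) (out : Int) : Prop := out = maxActivated_alt points
instance (points : List (List Int)) (out : Int) : Decidable (Spec_maxActivated points out) := by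
  unfold Spec_maxActivated; infer_instance

-- ===== CLAIM (what is proved, stated in full; the proofs are below) =====
def Claim_equal_maxActivated : Prop := ∀ (points : List (List Int)), Dom_maxActivated points → Pre_maxActivated points → Spec_maxActivated points (maxActivated points)

-- ===== LEMMAS AND PROOFS =====

def pstep (p : List Nat) (x : Nat) : Nat := p.getD x 0
def RootsTo (p : List Nat) (x r : Nat) (k : Nat) : Prop := (pstep p)^[k] x = r ∧ pstep p r = r
def Rt (p : List Nat) (x r : Nat) : Prop := ∃ k, RootsTo p x r k
def Ker (p : List Nat) (a b : Nat) : Prop := ∃ r, Rt p a r ∧ Rt p b r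

theorem rootsTo_mono {p : List Nat} {x r k k' : Nat} (h : RootsTo p x r k) (hk : k ≤ k') :
    RootsTo p x r k' := by
  obtain ⟨h1, h2⟩ := h
  refine ⟨?_, h2⟩
  have e := Function.iterate_add_apply (pstep p) (k' - k) k x
  rw [Nat.sub_add_cancel hk] at e
  rw [e, h1, Function.iterate_fixed h2]

theorem rootsTo_self {p : List Nat} {x : Nat} (h : pstep p x = x) (k : Nat) : RootsTo p x x k :=
  ⟨Function.iterate_fixed h k, h⟩

theorem rootsTo_unique {p : List Nat} {x r s k l : Nat}
    (h1 : RootsTo p x r k) (h2 : RootsTo p x s l) : r = s := by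
  have a := rootsTo_mono h1 (Nat.le_max_left k l)
  have b := rootsTo_mono h2 (Nat.le_max_right k l)
  rw [a.1.symm.trans b.1]

theorem rt_unique {p : List Nat} {x r s : Nat} (h1 : Rt p x r) (h2 : Rt p x s) : r = s := by
  obtain ⟨k, h1⟩ := h1; obtain ⟨l, h2⟩ := h2; exact rootsTo_unique h1 h2

theorem rootsTo_step {p : List Nat} {y s k : Nat} (hy : pstep p y ≠ y)
    (h : RootsTo p y s k) : ∃ k', k = k' + 1 ∧ RootsTo p (pstep p y) s k' := by
  obtain ⟨h1, h2⟩ := h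
  match k with
  | 0 => exact absurd (h1 ▸ h2) (by simpa using hy)
  | k + 1 =>
    refine ⟨k, rfl, ⟨?_, h2⟩⟩
    rwa [Function.iterate_succ_apply] at h1

theorem pstep_set {p : List Nat} {x : Nat} (r z : Nat) (hx : x < p.length) :
    pstep (p.set x r) z = if z = x then r else pstep p z := by
  unfold pstep
  rcases eq_or_ne z x with rfl | hz
  · simp [List.getD, hx]
  · rw [if_neg hz]
    simp only [List.getD]
    rw [List.getElem?_set_ne (Ne.symm hz)]

theorem rootsTo_lt {p : List Nat} (hb : ∀ z < p.length, pstep p z < p.length)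
    {x r k : Nat} (hx : x < p.length) (h : RootsTo p x r k) : r < p.length := by
  induction k generalizing x with
  | zero => obtain ⟨h1, _⟩ := h; simpa [← h1]
  | succ k ih =>
    obtain ⟨h1, h2⟩ := h
    rw [Function.iterate_succ_apply] at h1
    exact ih (hb x hx) ⟨h1, h2⟩

theorem rootsTo_compress {p : List Nat} {x r d : Nat} (hx : x < p.length)
    (hroot : RootsTo p x r d) (hxr : x ≠ r) :
    ∀ k y s, RootsTo p y s k → RootsTo (p.set x r) y s k := by
  have hxnotroot : pstep p x ≠ x := fun hfix => hxr (rootsTo_unique hroot (rootsTo_self hfix d)).symm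
  intro k
  induction k using Nat.strong_induction_on with
  | _ k ih =>
    intro y s hys
    have hr : pstep p r = r := hroot.2
    have hrx : r ≠ x := fun h => hxr h.symm
    have hstep_r : pstep (p.set x r) r = r := by rw [pstep_set r r hx, if_neg hrx]; exact hr
    by_cases hy : pstep p y = y
    · have hsy : s = y := rootsTo_unique hys (rootsTo_self hy k)
      subst hsy
      have hyx : s ≠ x := fun h => hxnotroot (h ▸ hy)
      have hfix : pstep (p.set x r) s = s := by rw [pstep_set r s hx, if_neg hyx]; exact hy
      exact rootsTo_self hfix k
    · obtain ⟨k', rfl, hz⟩ := rootsTo_step hy hys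
      rcases eq_or_ne y x with rfl | hyx
      · have hsr : s = r := rootsTo_unique hys hroot
        subst hsr
        have e1 : pstep (p.set y s) y = s := by rw [pstep_set s y hx, if_pos rfl]
        refine ⟨?_, hstep_r⟩
        rw [Function.iterate_succ_apply, e1, Function.iterate_fixed hstep_r]
      · have hz' := ih k' (Nat.lt_succ_self k') (pstep p y) s hz
        refine ⟨?_, hz'.2⟩
        rw [Function.iterate_succ_apply, pstep_set r y hx, if_neg hyx]
        exact hz'.1

theorem rootsTo_link {p : List Nat} {rx ry : Nat} (hrx : pstep p rx = rx) (hry : pstep p ry = ry)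
    (hne : rx ≠ ry) (hlen : ry < p.length) :
    ∀ k y s, RootsTo p y s k → RootsTo (p.set ry rx) y (if s = ry then rx else s) (k + 1) := by
  have hstep_rx : pstep (p.set ry rx) rx = rx := by rw [pstep_set rx rx hlen, if_neg hne]; exact hrx
  have hstep_ry : pstep (p.set ry rx) ry = rx := by rw [pstep_set rx ry hlen, if_pos rfl]
  intro k
  induction k using Nat.strong_induction_on with
  | _ k ih =>
    intro y s hys
    by_cases hy : pstep p y = y
    · have hsy : s = y := rootsTo_unique hys (rootsTo_self hy k)
      subst hsy
      rcases eq_or_ne s ry with rfl | hsry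
      · rw [if_pos rfl]
        refine ⟨?_, hstep_rx⟩
        rw [Function.iterate_succ_apply, hstep_ry, Function.iterate_fixed hstep_rx]
      · rw [if_neg hsry]
        have hfix : pstep (p.set ry rx) s = s := by rw [pstep_set rx s hlen, if_neg hsry]; exact hy
        exact rootsTo_self hfix (k + 1)
    · obtain ⟨k', rfl, hz⟩ := rootsTo_step hy hys
      have hyry : y ≠ ry := fun h => hy (h ▸ hry)
      have hz' := ih k' (Nat.lt_succ_self k') (pstep p y) s hz
      refine ⟨?_, hz'.2⟩
      rw [Function.iterate_succ_apply, pstep_set rx y hlen, if_neg hyry]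
      exact hz'.1

theorem dsFind_spec : ∀ (fuel : Nat) (p : List Nat) (x r d : Nat),
    (∀ z < p.length, pstep p z < p.length) → x < p.length →
    RootsTo p x r d → d < fuel →
    (dsFind fuel p x).2 = r ∧
    (dsFind fuel p x).1.length = p.length ∧
    (∀ z < p.length, pstep (dsFind fuel p x).1 z < p.length) ∧
    (∀ k y s, RootsTo p y s k → RootsTo (dsFind fuel p x).1 y s k) := by
  intro fuel
  induction fuel with
  | zero => intro p x r d _ _ _ hd; omega
  | succ f ih =>
    intro p x r d hb hx hroot hd
    by_cases hxp : x ≠ p.getD x 0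
    · have hxp' : pstep p x ≠ x := fun h => hxp (show x = p.getD x 0 from h.symm)
      obtain ⟨d', hdd, hrootpx⟩ := rootsTo_step hxp' hroot
      subst hdd
      have hpx : pstep p x < p.length := hb x hx
      obtain ⟨h2r, hlen, hb', hpres⟩ := ih p (pstep p x) r d' hb hpx hrootpx (by omega)
      have hxr : x ≠ r := by
        intro h
        rw [h] at hxp'
        exact hxp' hroot.2
      have hroot1 : RootsTo (dsFind f p (pstep p x)).1 x r (d' + 1) := hpres _ _ _ hroot
      have hx1 : x < (dsFind f p (pstep p x)).1.length := hlen ▸ hx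
      have hcomp := rootsTo_compress hx1 hroot1 hxr
      have hshape : dsFind (f + 1) p x =
          ((dsFind f p (pstep p x)).1.set x (dsFind f p (pstep p x)).2, (dsFind f p (pstep p x)).2) := by
        show (if x ≠ p.getD x 0 then _ else _) = _
        rw [if_pos hxp]; rfl
      rw [hshape]
      have hrlt : r < p.length := rootsTo_lt hb hx hroot
      refine ⟨h2r, ?_, ?_, ?_⟩
      · simp [hlen]
      · intro z hz
        rw [h2r, pstep_set r z hx1]
        rcases eq_or_ne z x with rfl | hzx
        · simpa using hrlt
        · rw [if_neg hzx]; exact hb' z hz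
      · intro k y s hys
        rw [h2r]
        exact hcomp k y s (hpres k y s hys)
    · push Not at hxp
      have hfix : pstep p x = x := hxp.symm
      have hshape : dsFind (f + 1) p x = (p, x) := by
        show (if x ≠ p.getD x 0 then _ else _) = _
        rw [if_neg (by rw [← hxp]; simp)]
      rw [hshape]
      have : r = x := (rootsTo_unique hroot (rootsTo_self hfix d)).symm.symm
      exact ⟨this.symm ▸ rfl, rfl, hb, fun _ _ _ h => h⟩

theorem dsUnion_spec (fuel : Nat) (sz : List Int) (p : List Nat) (x y D : Nat)
    (hb : ∀ z < p.length, pstep p z < p.length)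
    (htot : ∀ z < p.length, ∃ r, RootsTo p z r D)
    (hx : x < p.length) (hy : y < p.length) (hD : D < fuel) :
    ∃ rx ry w, (w = rx ∨ w = ry) ∧ Rt p x rx ∧ Rt p y ry ∧
      (dsUnion fuel sz p x y).2.length = p.length ∧
      (∀ z < p.length, pstep (dsUnion fuel sz p x y).2 z < p.length) ∧
      (∀ k z s, RootsTo p z s k →
        RootsTo (dsUnion fuel sz p x y).2 z (if s = rx ∨ s = ry then w else s) (k + 1)) := by
  obtain ⟨rx, hrootx⟩ := htot x hx
  obtain ⟨h2x, hlenx, hbx, hpresx⟩ := dsFind_spec fuel p x rx D hb hx hrootx hD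
  set p1 := (dsFind fuel p x).1 with hp1
  have hrooty1 : RootsTo p1 y _ D := hpresx D y _ (htot y hy).choose_spec
  set ry := (htot y hy).choose with hry
  have hy1 : y < p1.length := hlenx ▸ hy
  have hb1 : ∀ z < p1.length, pstep p1 z < p1.length := by rw [hlenx]; exact hbx
  obtain ⟨h2y, hleny, hby, hpresy⟩ := dsFind_spec fuel p1 y ry D hb1 hy1 hrooty1 hD
  set p2 := (dsFind fuel p1 y).1 with hp2
  have hlen2 : p2.length = p.length := hleny.trans hlenx
  have hb2 : ∀ z < p.length, pstep p2 z < p.length := by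
    intro z hz; have := hby z (hlenx ▸ hz); rwa [hlenx] at this
  have hpres2 : ∀ k z s, RootsTo p z s k → RootsTo p2 z s k := fun k z s h =>
    hpresy k z s (hpresx k z s h)
  have hrtx : Rt p x rx := ⟨D, hrootx⟩
  have hrty : Rt p y ry := ⟨D, (htot y hy).choose_spec⟩
  have hrxlt : rx < p.length := rootsTo_lt hb hx hrootx
  have hrylt : ry < p.length := rootsTo_lt hb hy (htot y hy).choose_spec
  have hrx2 : pstep p2 rx = rx := (hpres2 D x rx hrootx).2
  have hry2 : pstep p2 ry = ry := (hpres2 D y ry (htot y hy).choose_spec).2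
  have hshape : dsUnion fuel sz p x y =
      (if rx ≠ ry then
        if sz.getD rx 0 < sz.getD ry 0 then
          (sz.set ry (sz.getD ry 0 + sz.getD rx 0), p2.set rx ry)
        else
          (sz.set rx (sz.getD rx 0 + sz.getD ry 0), p2.set ry rx)
      else (sz, p2)) := by
    show (let fx := dsFind fuel p x
      let fy := dsFind fuel fx.1 y
      let p2 := fy.1
      let rx := fx.2
      let ry := fy.2
      if rx ≠ ry then
        if sz.getD rx 0 < sz.getD ry 0 then
          (sz.set ry (sz.getD ry 0 + sz.getD rx 0), p2.set rx ry)
        else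
          (sz.set rx (sz.getD rx 0 + sz.getD ry 0), p2.set ry rx)
      else (sz, p2)) = _
    simp only [← hp1, h2x, ← hp2, h2y]
  by_cases hne : rx = ry
  · refine ⟨rx, ry, rx, Or.inl rfl, hrtx, hrty, ?_⟩
    rw [hshape, if_neg (by simpa using hne)]
    refine ⟨hlen2, hb2, ?_⟩
    intro k z s hzs
    have h2 := hpres2 k z s hzs
    have : (if s = rx ∨ s = ry then rx else s) = s := by
      rcases eq_or_ne s rx with rfl | h
      · simp
      · rw [if_neg]; subst hne; simpa using h
    rw [this]
    exact rootsTo_mono h2 (Nat.le_succ k)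
  · rw [hshape, if_pos (by simpa using hne)]
    by_cases hsz : sz.getD rx 0 < sz.getD ry 0
    · -- parent[rx] = ry, winner ry
      rw [if_pos hsz]
      refine ⟨rx, ry, ry, Or.inr rfl, hrtx, hrty, ?_, ?_, ?_⟩
      · simpa using hlen2
      · intro z hz
        have hlink := rootsTo_link hry2 hrx2 (Ne.symm hne) (hlen2 ▸ hrxlt)
        -- entries bound: pstep (p2.set rx ry) z
        rw [pstep_set ry z (hlen2 ▸ hrxlt)]
        rcases eq_or_ne z rx with rfl | hzx
        · simpa using hrylt
        · rw [if_neg hzx]; exact hb2 z hz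
      · intro k z s hzs
        have h2 := hpres2 k z s hzs
        have hlink := rootsTo_link hry2 hrx2 (Ne.symm hne) (hlen2 ▸ hrxlt) k z s h2
        have : (if s = rx then ry else s) = (if s = rx ∨ s = ry then ry else s) := by
          rcases eq_or_ne s rx with rfl | h1
          · simp
          · rcases eq_or_ne s ry with rfl | h2'
            · simp [h1]
            · simp [h1, h2']
        rwa [this] at hlink
    · rw [if_neg hsz]
      refine ⟨rx, ry, rx, Or.inl rfl, hrtx, hrty, ?_, ?_, ?_⟩
      · simpa using hlen2
      · intro z hz
        rw [pstep_set rx z (hlen2 ▸ hrylt)]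
        rcases eq_or_ne z ry with rfl | hzy
        · simpa using hrxlt
        · rw [if_neg hzy]; exact hb2 z hz
      · intro k z s hzs
        have h2 := hpres2 k z s hzs
        have hlink := rootsTo_link hrx2 hry2 hne (hlen2 ▸ hrylt) k z s h2
        have : (if s = ry then rx else s) = (if s = rx ∨ s = ry then rx else s) := by
          rcases eq_or_ne s ry with rfl | h1
          · simp
          · rcases eq_or_ne s rx with rfl | h2'
            · simp [h1]
            · simp [h1, h2']
        rwa [this] at hlink

theorem bMerge_length (lab : List Nat) (m i : Nat) : (bMerge lab m i).length = lab.length := by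
  simp only [bMerge]
  split <;> simp

theorem bMerge_getD {lab : List Nat} (m i a : Nat) (ha : a < lab.length) :
    (bMerge lab m i).getD a 0 =
      if lab.getD m 0 ≠ lab.getD i 0 ∧ lab.getD a 0 = lab.getD i 0 then lab.getD m 0
      else lab.getD a 0 := by
  have hgm : ∀ (f : Nat → Nat), (lab.map f).getD a 0 = f (lab.getD a 0) := by
    intro f
    simp [List.getD_eq_getElem?_getD, List.getElem?_eq_getElem ha]
  simp only [bMerge]
  split
  · next hab =>
    rw [hgm]
    split_ifs <;> simp_all
  · next hab =>
    split_ifs <;> simp_all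

theorem sim_union (n fuel D : Nat) (sz : List Int) (p : List Nat) (lab : List Nat) (i m : Nat)
    (hlen : p.length = n + 1) (hb : ∀ z < p.length, pstep p z < p.length)
    (htot : ∀ z < p.length, ∃ r, RootsTo p z r D)
    (hrootn : ∀ z r, z < n → Rt p z r → r < n)
    (hlab : lab.length = n)
    (hker : ∀ a b, a < n → b < n → (Ker p a b ↔ lab.getD a 0 = lab.getD b 0))
    (hi : i < n) (hm : m < n) (hD : D < fuel) :
    (dsUnion fuel sz p i m).2.length = n + 1 ∧
    (∀ z < (dsUnion fuel sz p i m).2.length, pstep (dsUnion fuel sz p i m).2 z < (dsUnion fuel sz p i m).2.length) ∧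
    (∀ z < (dsUnion fuel sz p i m).2.length, ∃ r, RootsTo (dsUnion fuel sz p i m).2 z r (D + 1)) ∧
    (∀ z r, z < n → Rt (dsUnion fuel sz p i m).2 z r → r < n) ∧
    (bMerge lab m i).length = n ∧
    (∀ a b, a < n → b < n →
      (Ker (dsUnion fuel sz p i m).2 a b ↔ (bMerge lab m i).getD a 0 = (bMerge lab m i).getD b 0)) := by
  have hi' : i < p.length := by omega
  have hm' : m < p.length := by omega
  obtain ⟨rx, ry, w, hw, hrtx, hrty, hlen', hb', hpres⟩ :=
    dsUnion_spec fuel sz p i m D hb htot hi' hm' hD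
  set p' := (dsUnion fuel sz p i m).2 with hp'
  have hplen : p'.length = n + 1 := by rw [hlen', hlen]
  have hb'' : ∀ z < p'.length, pstep p' z < p'.length := by rw [hlen']; exact hb'
  -- forward root transfer
  have fact1 : ∀ z s, Rt p z s → Rt p' z (if s = rx ∨ s = ry then w else s) := by
    rintro z s ⟨k, hk⟩
    exact ⟨k + 1, hpres k z s hk⟩
  have htot' : ∀ z < p'.length, ∃ r, RootsTo p' z r (D + 1) := by
    intro z hz
    obtain ⟨r, hr⟩ := htot z (by omega)
    exact ⟨_, hpres D z r hr⟩
  -- backward root characterization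
  have fact2 : ∀ z < p.length, ∀ s', Rt p' z s' → ∃ s, Rt p z s ∧ s' = (if s = rx ∨ s = ry then w else s) := by
    intro z hz s' hs'
    obtain ⟨r, hr⟩ := htot z hz
    refine ⟨r, ⟨D, hr⟩, ?_⟩
    exact rt_unique hs' (fact1 z r ⟨D, hr⟩)
  have hrxn : rx < n := hrootn i rx hi hrtx
  have hryn : ry < n := hrootn m ry hm hrty
  have hwn : w < n := by rcases hw with rfl | rfl <;> assumption
  have hrootn' : ∀ z r, z < n → Rt p' z r → r < n := by
    intro z r hz hr
    obtain ⟨s, hs, rfl⟩ := fact2 z (by omega) r hr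
    split
    · exact hwn
    · exact hrootn z s hz hs
  refine ⟨hplen, hb'', htot', hrootn', by rw [bMerge_length, hlab], ?_⟩
  intro a b ha hb'''
  have ha' : a < p.length := by omega
  have hb4 : b < p.length := by omega
  obtain ⟨ra, hra⟩ := htot a ha'
  obtain ⟨rb, hrb⟩ := htot b hb4
  have hrta : Rt p a ra := ⟨D, hra⟩
  have hrtb : Rt p b rb := ⟨D, hrb⟩
  -- Ker p' a b ↔ redirect ra = redirect rb
  have keriff : Ker p' a b ↔
      (if ra = rx ∨ ra = ry then w else ra) = (if rb = rx ∨ rb = ry then w else rb) := by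
    constructor
    · rintro ⟨r', hr'a, hr'b⟩
      have e1 := rt_unique hr'a (fact1 a ra hrta)
      have e2 := rt_unique hr'b (fact1 b rb hrtb)
      rw [← e1, ← e2]
    · intro h
      exact ⟨_, fact1 a ra hrta, h ▸ fact1 b rb hrtb⟩
  -- atom translations
  have atom_ab : ra = rb ↔ lab.getD a 0 = lab.getD b 0 := by
    rw [← hker a b ha hb''']
    constructor
    · rintro rfl; exact ⟨ra, hrta, hrtb⟩
    · rintro ⟨r, h1, h2⟩
      rw [rt_unique hrta h1, rt_unique hrtb h2]
  have atom_ax : ra = rx ↔ lab.getD a 0 = lab.getD i 0 := by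
    rw [← hker a i ha hi]
    constructor
    · rintro rfl; exact ⟨ra, hrta, hrtx⟩
    · rintro ⟨r, h1, h2⟩
      rw [rt_unique hrta h1, rt_unique hrtx h2]
  have atom_ay : ra = ry ↔ lab.getD a 0 = lab.getD m 0 := by
    rw [← hker a m ha hm]
    constructor
    · rintro rfl; exact ⟨ra, hrta, hrty⟩
    · rintro ⟨r, h1, h2⟩
      rw [rt_unique hrta h1, rt_unique hrty h2]
  have atom_bx : rb = rx ↔ lab.getD b 0 = lab.getD i 0 := by
    rw [← hker b i hb''' hi]
    constructor
    · rintro rfl; exact ⟨rb, hrtb, hrtx⟩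
    · rintro ⟨r, h1, h2⟩
      rw [rt_unique hrtb h1, rt_unique hrtx h2]
  have atom_by : rb = ry ↔ lab.getD b 0 = lab.getD m 0 := by
    rw [← hker b m hb''' hm]
    constructor
    · rintro rfl; exact ⟨rb, hrtb, hrty⟩
    · rintro ⟨r, h1, h2⟩
      rw [rt_unique hrtb h1, rt_unique hrty h2]
  have atom_xy : rx = ry ↔ lab.getD i 0 = lab.getD m 0 := by
    rw [← hker i m hi hm]
    constructor
    · rintro rfl; exact ⟨rx, hrtx, hrty⟩
    · rintro ⟨r, h1, h2⟩
      rw [rt_unique hrtx h1, rt_unique hrty h2]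
  have hchar : Ker (dsUnion fuel sz p i m).2 a b ↔
      (ra = rb ∨ ((ra = rx ∨ ra = ry) ∧ (rb = rx ∨ rb = ry))) := by
    rw [keriff]
    rcases hw with rfl | rfl <;> split_ifs <;> omega
  rw [hchar, bMerge_getD m i a (by omega), bMerge_getD m i b (by omega)]
  rw [atom_ab, atom_ax, atom_ay, atom_bx, atom_by]
  split_ifs <;> omega

def SimInv (n D : Nat)
    (stA : PySem.Dict Int Nat × PySem.Dict Int Nat × List Int × List Nat)
    (stB : PySem.Dict Int Nat × PySem.Dict Int Nat × List Nat) : Prop :=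
  stA.1 = stB.1 ∧ stA.2.1 = stB.2.1 ∧
  (∀ kv ∈ stA.1.items, kv.2 < n) ∧ (∀ kv ∈ stA.2.1.items, kv.2 < n) ∧
  stA.2.2.2.length = n + 1 ∧
  (∀ z < n + 1, pstep stA.2.2.2 z < n + 1) ∧
  (∀ z < n + 1, ∃ r, RootsTo stA.2.2.2 z r D) ∧
  (∀ z r, z < n → Rt stA.2.2.2 z r → r < n) ∧
  stB.2.2.length = n ∧
  (∀ a b, a < n → b < n → (Ker stA.2.2.2 a b ↔ stB.2.2.getD a 0 = stB.2.2.getD b 0))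

theorem simInv_mono {n D D' : Nat} {stA stB} (hD : D ≤ D')
    (h : SimInv n D stA stB) : SimInv n D' stA stB := by
  obtain ⟨h1, h2, h3, h4, h5, h6, h7, h8, h9, h10⟩ := h
  exact ⟨h1, h2, h3, h4, h5, h6, fun z hz => (h7 z hz).imp (fun r hr => rootsTo_mono hr hD),
    h8, h9, h10⟩

theorem dict_getD_lt {d : PySem.Dict Int Nat} {n : Nat} (h : ∀ kv ∈ d.items, kv.2 < n) {x : Int}
    (hc : d.contains x = true) : d.getD x 0 < n := by
  rw [PySem.Dict.contains_eq_isSome_get?] at hc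
  obtain ⟨v, hv⟩ := Option.isSome_iff_exists.mp hc
  have hm := PySem.Dict.mem_items_of_get?_eq_some d hv
  have hlt := h _ hm
  show (d.get? x).getD 0 < n
  rw [hv]
  exact hlt

theorem dict_insert_bound {d : PySem.Dict Int Nat} {n : Nat} (h : ∀ kv ∈ d.items, kv.2 < n)
    {x : Int} {i : Nat} (hi : i < n) : ∀ kv ∈ (d.insert x i).items, kv.2 < n := by
  intro kv hkv
  rw [PySem.Dict.mem_items_insert] at hkv
  rcases hkv with rfl | ⟨hkv, _⟩
  · exact hi
  · exact h kv hkv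

theorem sim_step (points : List (List Int)) (fuel D i : Nat) (hi : i < points.length)
    (stA : PySem.Dict Int Nat × PySem.Dict Int Nat × List Int × List Nat)
    (stB : PySem.Dict Int Nat × PySem.Dict Int Nat × List Nat)
    (hfuel : D + 2 ≤ fuel) (h : SimInv points.length D stA stB) :
    SimInv points.length (D + 2) (aBody points fuel stA i) (bBody points stB i) := by
  set n := points.length with hn
  obtain ⟨h1, h2, h3, h4, h5, h6, h7, h8, h9, h10⟩ := h
  obtain ⟨xmA, ymA, sz, p⟩ := stA
  obtain ⟨xmB, ymB, lab⟩ := stB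
  simp only at h1 h2 h3 h4 h5 h6 h7 h8 h9 h10
  subst h1 h2
  set x := (points.getD i []).getD 0 0 with hx
  set y := (points.getD i []).getD 1 0 with hy
  by_cases hcx : xmA.contains x
  · -- x-side union/merge
    have hmlt : xmA.getD x 0 < n := dict_getD_lt h3 hcx
    have hu := sim_union n fuel D sz p lab i (xmA.getD x 0) h5
      (by rw [h5]; exact h6) (by rw [h5]; exact h7) h8 h9 h10 hi hmlt (show D < fuel by omega)
    obtain ⟨u1, u2, u3, u4, u5, u6⟩ := hu
    set p1 := (dsUnion fuel sz p i (xmA.getD x 0)).2 with hp1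
    set lab1 := bMerge lab (xmA.getD x 0) i with hlab1
    by_cases hcy : ymA.contains y
    · have hmy : ymA.getD y 0 < n := dict_getD_lt h4 hcy
      have hu2 := sim_union n fuel (D + 1) (dsUnion fuel sz p i (xmA.getD x 0)).1 p1 lab1 i
        (ymA.getD y 0) u1 u2 u3 u4 u5 u6 hi hmy (show D + 1 < fuel by omega)
      obtain ⟨v1, v2, v3, v4, v5, v6⟩ := hu2
      simp only [aBody, bBody, ← hx, ← hy, hcx, hcy, if_true]
      refine ⟨rfl, rfl, h3, h4, v1, ?_, ?_, v4, v5, v6⟩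
      · intro z hz
        rw [← v1] at hz
        have hh := v2 z hz
        rwa [v1] at hh
      · intro z hz
        rw [← v1] at hz
        exact v3 z hz
    · rw [Bool.not_eq_true] at hcy
      simp only [aBody, bBody, ← hx, ← hy, hcx, hcy, Bool.false_eq_true, if_true, if_false]
      refine simInv_mono (D := D + 1) (by omega) ?_
      refine ⟨rfl, rfl, h3, dict_insert_bound h4 hi, u1, ?_, ?_, u4, u5, u6⟩
      · intro z hz
        rw [← u1] at hz
        have hh := u2 z hz
        rwa [u1] at hh
      · intro z hz
        rw [← u1] at hz
        exact u3 z hz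
  · by_cases hcy : ymA.contains y
    · have hmy : ymA.getD y 0 < n := dict_getD_lt h4 hcy
      have hu := sim_union n fuel D sz p lab i (ymA.getD y 0) h5
        (by rw [h5]; exact h6) (by rw [h5]; exact h7) h8 h9 h10 hi hmy (show D < fuel by omega)
      obtain ⟨u1, u2, u3, u4, u5, u6⟩ := hu
      rw [Bool.not_eq_true] at hcx
      simp only [aBody, bBody, ← hx, ← hy, hcx, hcy, Bool.false_eq_true, if_true, if_false]
      refine simInv_mono (D := D + 1) (by omega) ?_
      refine ⟨rfl, rfl, dict_insert_bound h3 hi, h4, u1, ?_, ?_, u4, u5, u6⟩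
      · intro z hz
        rw [← u1] at hz
        have hh := u2 z hz
        rwa [u1] at hh
      · intro z hz
        rw [← u1] at hz
        exact u3 z hz
    · rw [Bool.not_eq_true] at hcx
      rw [Bool.not_eq_true] at hcy
      simp only [aBody, bBody, ← hx, ← hy, hcx, hcy, Bool.false_eq_true, if_false]
      refine simInv_mono (D := D) (by omega) ?_
      exact ⟨rfl, rfl, dict_insert_bound h3 hi, dict_insert_bound h4 hi, h5, h6, h7, h8, h9,
        h10⟩

theorem sim_fold (points : List (List Int)) (fuel : Nat) :
    ∀ (l : List Nat) (D : Nat) stA stB, (∀ j ∈ l, j < points.length) →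
    D + 2 * l.length ≤ fuel → SimInv points.length D stA stB →
    SimInv points.length (D + 2 * l.length)
      (l.foldl (aBody points fuel) stA) (l.foldl (bBody points) stB) := by
  intro l
  induction l with
  | nil => intro D stA stB _ _ h; simpa using h
  | cons j l ih =>
    intro D stA stB hj hf h
    have h1 := sim_step points fuel D j (hj j (by simp)) stA stB (by simp at hf; omega) h
    have h2 := ih (D + 2) _ _ (fun a ha => hj a (by simp [ha])) (by simp at hf ⊢; omega) h1
    simp only [List.foldl_cons]
    have e : D + 2 * (j :: l).length = D + 2 + 2 * l.length := by
      simp only [List.length_cons]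
      omega
    rw [e]
    exact h2

theorem sim_init (points : List (List Int)) :
    SimInv points.length 0
      (PySem.Dict.empty, PySem.Dict.empty, List.replicate (points.length + 1) (1 : Int),
        List.range (points.length + 1))
      (PySem.Dict.empty, PySem.Dict.empty, List.range points.length) := by
  set n := points.length
  have hstep : ∀ z, z < n + 1 → pstep (List.range (n + 1)) z = z := by
    intro z hz
    unfold pstep
    simp [List.getD_eq_getElem?_getD, hz]
  have hroot : ∀ z, z < n + 1 → ∀ r, Rt (List.range (n + 1)) z r → r = z := by
    intro z hz r hr
    exact (rt_unique hr ⟨0, rootsTo_self (hstep z hz) 0⟩)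
  have hemp : ∀ m : Nat, ∀ kv ∈ (PySem.Dict.empty : PySem.Dict Int Nat).items, kv.2 < m := by
    intro m kv hkv
    rw [show (PySem.Dict.empty : PySem.Dict Int Nat).items = [] from rfl] at hkv
    cases hkv
  refine ⟨rfl, rfl, hemp n, hemp n, by simp, ?_, ?_, ?_, by simp, ?_⟩
  · intro z hz; rw [hstep z hz]; omega
  · intro z hz; exact ⟨z, rootsTo_self (hstep z hz) 0⟩
  · intro z r hz hr; rw [hroot z (by omega) r hr]; omega
  · intro a b ha hb
    constructor
    · rintro ⟨r, h1, h2⟩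
      have e1 := hroot a (by omega) r h1
      have e2 := hroot b (by omega) r h2
      simp [List.getD_eq_getElem?_getD, ha, hb]
      omega
    · intro h
      simp [List.getD_eq_getElem?_getD, ha, hb] at h
      subst h
      exact ⟨a, ⟨0, rootsTo_self (hstep a (by omega)) 0⟩, ⟨0, rootsTo_self (hstep a (by omega)) 0⟩⟩

theorem list_getD_set {α : Type} (c : List α) (x : Nat) (v d : α) (z : Nat) (hx : x < c.length) :
    (c.set x v).getD z d = if z = x then v else c.getD z d := by
  rcases eq_or_ne z x with rfl | hz
  · simp [List.getD, hx]
  · rw [if_neg hz]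
    simp only [List.getD]
    rw [List.getElem?_set_ne (Ne.symm hz)]

theorem comp_fold (fuel n : Nat) (rf : Nat → Nat) : ∀ (l : List Nat) (p : List Nat) (c : List Int) (D : Nat),
    (∀ j ∈ l, j < n) → p.length = n + 1 → (∀ z < n + 1, pstep p z < n + 1) →
    (∀ z < n + 1, ∃ r, RootsTo p z r D) → D < fuel →
    (∀ z < n, Rt p z (rf z)) → (∀ z < n, rf z < n) → c.length = n →
    (l.foldl (aCompBody fuel) (p, c)).2.length = n ∧
    (∀ r : Nat, (l.foldl (aCompBody fuel) (p, c)).2.getD r 0 = c.getD r 0 + ((l.map rf).count r : Int)) := by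
  intro l
  induction l with
  | nil => intro p c D _ _ _ _ _ _ _ hc; simp [hc]
  | cons j l ih =>
    intro p c D hj hplen hb htot hD hrf hrfn hc
    have hjn : j < n := hj j (by simp)
    obtain ⟨r0, hr0⟩ := htot j (by omega)
    have hb' : ∀ z < p.length, pstep p z < p.length := by
      intro z hz
      rw [hplen] at hz ⊢
      exact hb z hz
    obtain ⟨h2r, hlen1, hb1, hpres1⟩ := dsFind_spec fuel p j r0 D hb' (by omega) hr0 hD
    have hr0rf : r0 = rf j := rt_unique ⟨D, hr0⟩ (hrf j hjn)
    have hshape : aCompBody fuel (p, c) j =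
        ((dsFind fuel p j).1, c.set (rf j) (c.getD (rf j) 0 + 1)) := by
      simp only [aCompBody, h2r, hr0rf]
    simp only [List.foldl_cons, hshape]
    set p1 := (dsFind fuel p j).1 with hp1
    have hplen1 : p1.length = n + 1 := by rw [hlen1, hplen]
    have hb1' : ∀ z < n + 1, pstep p1 z < n + 1 := by
      intro z hz
      have hh := hb1 z (by omega)
      rwa [hplen] at hh
    have htot1 : ∀ z < n + 1, ∃ r, RootsTo p1 z r D := by
      intro z hz
      obtain ⟨r, hr⟩ := htot z hz
      exact ⟨r, hpres1 D z r hr⟩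
    have hrf1 : ∀ z < n, Rt p1 z (rf z) := by
      intro z hz
      obtain ⟨k, hk⟩ := hrf z hz
      exact ⟨k, hpres1 k z (rf z) hk⟩
    have hc1 : (c.set (rf j) (c.getD (rf j) 0 + 1)).length = n := by simp [hc]
    obtain ⟨hL, hC⟩ := ih p1 (c.set (rf j) (c.getD (rf j) 0 + 1)) D
      (fun a ha => hj a (by simp [ha])) hplen1 hb1' htot1 hD hrf1 hrfn hc1
    refine ⟨hL, ?_⟩
    intro r
    rw [hC r]
    have hrfj : rf j < c.length := by rw [hc]; exact hrfn j hjn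
    rw [list_getD_set c (rf j) _ 0 r hrfj]
    simp only [List.map_cons, List.count_cons]
    rcases eq_or_ne r (rf j) with rfl | hne
    · simp
      ring
    · rw [if_neg hne]
      have : (rf j == r) = false := by simp [Ne.symm hne]
      simp [this]

theorem ofList_map_inj (R : List Nat) (φ : Nat → Nat)
    (hinj : ∀ a ∈ R, ∀ b ∈ R, φ a = φ b → a = b) :
    PySem.Set.ofList (R.map φ) = (PySem.Set.ofList R).map φ := by
  induction R using List.reverseRecOn with
  | nil => rfl
  | append_singleton R x ih =>
    have hinj' : ∀ a ∈ R, ∀ b ∈ R, φ a = φ b → a = b := fun a ha b hb =>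
      hinj a (by simp [ha]) b (by simp [hb])
    have hmem : φ x ∈ (PySem.Set.ofList R).map φ ↔ x ∈ PySem.Set.ofList R := by
      constructor
      · intro h
        obtain ⟨a, ha, hax⟩ := List.mem_map.mp h
        have ha' : a ∈ R := (PySem.Set.mem_ofList R a).mp ha
        have := hinj a (by simp [ha']) x (by simp) hax
        rwa [← this]
      · intro h
        exact List.mem_map.mpr ⟨x, h, rfl⟩
    rw [List.map_append, PySem.Set.ofList_append, PySem.Set.ofList_append]
    simp only [PySem.Set.update, List.map_cons, List.map_nil, List.foldl_cons, List.foldl_nil]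
    rw [ih hinj']
    by_cases hx : x ∈ PySem.Set.ofList R
    · rw [PySem.Set.add_of_mem hx, PySem.Set.add_of_mem (hmem.mpr hx)]
    · rw [PySem.Set.add_of_not_mem hx, PySem.Set.add_of_not_mem (fun h => hx (hmem.mp h)),
        List.map_append]
      rfl

theorem count_map_inj (R : List Nat) (φ : Nat → Nat)
    (hinj : ∀ a ∈ R, ∀ b ∈ R, φ a = φ b → a = b) :
    ∀ v ∈ R, (R.map φ).count (φ v) = R.count v := by
  intro v hv
  rw [List.count_eq_countP, List.count_eq_countP, List.countP_map]
  apply List.countP_congr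
  intro a ha
  simp only [Function.comp_apply, beq_iff_eq]
  constructor
  · intro h; exact (by simpa using hinj a ha v hv (by simpa using h))
  · intro h; simp [show a = v from by simpa using h]

theorem kernel_counts (R G : List Nat) (hlen : R.length = G.length)
    (hker : ∀ i j, i < R.length → j < R.length →
      (R.getD i 0 = R.getD j 0 ↔ G.getD i 0 = G.getD j 0)) :
    (PySem.Set.ofList G).map (fun v => G.count v) = (PySem.Set.ofList R).map (fun v => R.count v) := by
  classical
  have gd : ∀ (L : List Nat) (i : Nat) (hi : i < L.length), L.getD i 0 = L[i]'hi := by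
    intro L i hi
    rw [List.getD_eq_getElem?_getD, List.getElem?_eq_getElem hi]
    rfl
  set φ : Nat → Nat := fun v =>
    match PySem.List.index? R v with
    | some k => G.getD k 0
    | none => 0 with hφdef
  have hφ : ∀ i, i < R.length → φ (R.getD i 0) = G.getD i 0 := by
    intro i hi
    have hmem : R.getD i 0 ∈ R := by rw [gd R i hi]; exact List.getElem_mem _
    obtain ⟨k, hk⟩ := Option.isSome_iff_exists.mp ((PySem.List.index?_isSome_iff _ _).mpr hmem)
    obtain ⟨hklt, hkeq, _⟩ := PySem.List.getElem_of_index?_eq_some hk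
    have hrkd : R.getD k 0 = R.getD i 0 := by rw [gd R k hklt]; exact hkeq
    have hg := (hker k i hklt hi).mp hrkd
    simp only [hφdef, hk]
    exact hg
  have hGmap : G = R.map φ := by
    apply List.ext_getElem (by simp [hlen])
    intro i h1 h2
    have hi : i < R.length := by simpa using h2
    have := hφ i hi
    rw [gd R i hi, gd G i (by omega)] at this
    simp [← this]
  have hinj : ∀ a ∈ R, ∀ b ∈ R, φ a = φ b → a = b := by
    intro a ha b hb hab
    obtain ⟨i, hi, rfl⟩ := List.getElem_of_mem ha
    obtain ⟨j, hj, rfl⟩ := List.getElem_of_mem hb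
    rw [← gd R i hi, ← gd R j hj] at hab ⊢
    rw [hφ i hi, hφ j hj] at hab
    exact (hker i j hi hj).mpr hab
  rw [hGmap, ofList_map_inj R φ hinj, List.map_map]
  apply List.map_congr_left
  intro v hv
  have hv' : v ∈ R := (PySem.Set.mem_ofList R v).mp hv
  simp only [Function.comp_apply]
  rw [← hGmap]
  rw [hGmap, count_map_inj R φ hinj v hv']

theorem count_perm_pad (R : List Nat) (n : Nat) (hmem : ∀ r ∈ R, r < n) :
    ((List.range n).map (fun r => R.count r)).Perm
      ((PySem.Set.ofList R).map (fun v => R.count v) ++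
        List.replicate (n - (PySem.Set.ofList R).length) 0) := by
  classical
  set S := PySem.Set.ofList R with hS
  have hSsub : ∀ a ∈ S, a ∈ List.range n := by
    intro a ha
    rw [List.mem_range]
    exact hmem a ((PySem.Set.mem_ofList R a).mp ha)
  have hSnodup : S.Nodup := PySem.Set.nodup_ofList R
  have hfilter : ((List.range n).filter (fun r => decide (r ∈ S))).Perm S := by
    rw [List.perm_iff_count]
    intro a
    by_cases ha : a ∈ S
    · rw [List.count_filter (by simpa using ha)]
      exact (List.count_eq_one_of_mem List.nodup_range (hSsub a ha)).trans
        (List.count_eq_one_of_mem hSnodup ha).symm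
    · have h1 : a ∉ (List.range n).filter (fun r => decide (r ∈ S)) := by
        intro h
        exact ha (by simpa using List.of_mem_filter h)
      exact (List.count_eq_zero.mpr h1).trans (List.count_eq_zero.mpr ha).symm
  have hsplit : ((List.range n).filter (fun r => decide (r ∈ S)) ++
      (List.range n).filter (fun r => !decide (r ∈ S))).Perm (List.range n) :=
    List.filter_append_perm _ _
  set FN := (List.range n).filter (fun r => !decide (r ∈ S)) with hFN
  have hperm : (List.range n).Perm (S ++ FN) :=
    hsplit.symm.trans (hfilter.append_right FN)
  have hmapperm := hperm.map (fun r => R.count r)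
  rw [List.map_append] at hmapperm
  have hzeros : FN.map (fun r => R.count r) = List.replicate FN.length 0 := by
    rw [List.eq_replicate_iff]
    refine ⟨by simp, ?_⟩
    intro b hb
    obtain ⟨r, hr, rfl⟩ := List.mem_map.mp hb
    have hrS : r ∉ S := by
      have := List.of_mem_filter hr
      simpa using this
    have hrR : r ∉ R := fun h => hrS ((PySem.Set.mem_ofList R r).mpr h)
    exact List.count_eq_zero.mpr hrR
  rw [hzeros] at hmapperm
  have hlenFN : FN.length = n - S.length := by
    have h1 := hsplit.length_eq
    have h2 := hfilter.length_eq
    simp only [List.length_append, List.length_range] at h1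
    omega
  rw [hlenFN] at hmapperm
  exact hmapperm

theorem replicate_getD_zero (n r : Nat) : (List.replicate n (0 : Int)).getD r 0 = 0 := by
  rcases lt_or_ge r n with h | h
  · simp [List.getD_eq_getElem?_getD, h]
  · rw [List.getD_eq_getElem?_getD,
      List.getElem?_eq_none (show (List.replicate n (0 : Int)).length ≤ r by simpa using h)]
    rfl

theorem maxActivated_spec : Claim_equal_maxActivated := by
  unfold Claim_equal_maxActivated
  intro points _hdom _hpre
  unfold Spec_maxActivated
  simp only [maxActivated, maxActivated_alt]
  set n := points.length with hn
  set fuel := 2 * n + 2 with hfuel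
  -- run the simulation over the main loops
  have hsim := sim_fold points fuel (List.range n) 0
    (PySem.Dict.empty, PySem.Dict.empty, List.replicate (n + 1) (1 : Int), List.range (n + 1))
    (PySem.Dict.empty, PySem.Dict.empty, List.range n)
    (fun j hj => by simpa using hj) (by simp; omega) (sim_init points)
  rw [show (0 + 2 * (List.range n).length) = 2 * n by simp] at hsim
  obtain ⟨-, -, -, -, h5, h6, h7, h8, h9, h10⟩ := hsim
  set pA := ((List.range n).foldl (aBody points fuel)
    (PySem.Dict.empty, PySem.Dict.empty, List.replicate (n + 1) (1 : Int),
      List.range (n + 1))).2.2.2 with hpA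
  set lab := ((List.range n).foldl (bBody points)
    (PySem.Dict.empty, PySem.Dict.empty, List.range n)).2.2 with hlab
  -- the root function of the final forest
  set rf : Nat → Nat := fun z => (pstep pA)^[fuel] z with hrf
  have hrfRoots : ∀ z, z < n + 1 → RootsTo pA z (rf z) (2 * n) := by
    intro z hz
    obtain ⟨r, hr⟩ := h7 z hz
    have : rf z = r := (rootsTo_mono hr (by omega)).1
    rw [this]
    exact hr
  have hrfRt : ∀ z, z < n → Rt pA z (rf z) := fun z hz => ⟨2 * n, hrfRoots z (by omega)⟩
  have hrflt : ∀ z < n, rf z < n := fun z hz => h8 z (rf z) hz (hrfRt z hz)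
  set R := (List.range n).map rf with hR
  have hRlen : R.length = n := by simp [hR]
  have hRgetD : ∀ i, i < n → R.getD i 0 = rf i := by
    intro i hi
    simp [hR, List.getD_eq_getElem?_getD, hi]
  have hRmem : ∀ r ∈ R, r < n := by
    intro r hr
    obtain ⟨z, hz, rfl⟩ := List.mem_map.mp hr
    exact hrflt z (by simpa using hz)
  -- kernels agree
  have hkerR : ∀ i j, i < R.length → j < R.length →
      (R.getD i 0 = R.getD j 0 ↔ lab.getD i 0 = lab.getD j 0) := by
    intro i j hi hj
    rw [hRlen] at hi hj
    rw [hRgetD i hi, hRgetD j hj, ← h10 i j hi hj]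
    constructor
    · intro h
      exact ⟨rf i, hrfRt i hi, h ▸ hrfRt j hj⟩
    · rintro ⟨r, h1, h2⟩
      rw [rt_unique (hrfRt i hi) h1, rt_unique (hrfRt j hj) h2]
  -- A's counting loop
  have hcf := comp_fold fuel n rf (List.range n) pA (List.replicate n (0 : Int)) (2 * n)
    (fun j hj => by simpa using hj) h5 h6 h7 (by omega) (fun z hz => hrfRt z hz) hrflt (by simp)
  obtain ⟨hclen, hcgetD⟩ := hcf
  set comp := ((List.range n).foldl (aCompBody fuel) (pA, List.replicate n (0 : Int))).2 with hcomp
  have hcomp_eq : comp = (List.range n).map (fun r => (R.count r : Int)) := by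
    apply List.ext_getElem (by simp [hclen])
    intro i hi1 hi2
    have hi : i < n := by rwa [hclen] at hi1
    have e1 : comp[i] = comp.getD i 0 := by
      rw [List.getD_eq_getElem?_getD, List.getElem?_eq_getElem hi1]
      rfl
    rw [e1, hcgetD i, replicate_getD_zero]
    simp only [List.getElem_map, List.getElem_range]
    rw [← hR]
    omega
  -- B's counter
  have hcnt : lab.foldl (fun (d : PySem.Dict Nat Int) v => d.insert v (d.getD v 0 + 1))
      PySem.Dict.empty = PySem.Dict.counter lab := PySem.Dict.foldl_insert_getD_add_one_eq_counter lab
  have hvals : (PySem.Dict.counter lab).values =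
      (PySem.Set.ofList lab).map (fun k => (lab.count k : Int)) := by
    show (PySem.Dict.counter lab).items.map (·.2) = _
    rw [PySem.Dict.items_counter]
    simp
  -- counts agree
  have hkc := kernel_counts R lab (by rw [hRlen, h9]) hkerR
  set countsB := (PySem.Set.ofList lab).map (fun k => (lab.count k : Int)) with hcountsB
  set K := (PySem.Set.ofList lab).length with hK
  have hKR : (PySem.Set.ofList R).length = K := by
    have := congrArg List.length hkc
    simpa using this.symm
  have hcountsB_eq : countsB = (PySem.Set.ofList R).map (fun v => (R.count v : Int)) := by
    rw [hcountsB]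
    have e1 : (PySem.Set.ofList lab).map (fun k => ((lab.count k : Nat) : Int)) =
        ((PySem.Set.ofList lab).map (fun v => lab.count v)).map (fun c : Nat => (c : Int)) := by
      rw [List.map_map]; rfl
    have e2 : (PySem.Set.ofList R).map (fun v => ((R.count v : Nat) : Int)) =
        ((PySem.Set.ofList R).map (fun v => R.count v)).map (fun c : Nat => (c : Int)) := by
      rw [List.map_map]; rfl
    rw [e1, e2, hkc]
  -- the permutation between A's count list and B's padded counts
  have hpermNat := count_perm_pad R n hRmem
  have hperm : comp.Perm (countsB ++ List.replicate (n - K) (0 : Int)) := by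
    rw [hcomp_eq, hcountsB_eq]
    have e1 : (List.range n).map (fun r => (R.count r : Int)) =
        ((List.range n).map (fun r => R.count r)).map (fun c : Nat => (c : Int)) := by
      rw [List.map_map]; rfl
    have e2 : (PySem.Set.ofList R).map (fun v => (R.count v : Int)) ++
        List.replicate (n - K) (0 : Int) =
        ((PySem.Set.ofList R).map (fun v => R.count v) ++
          List.replicate (n - (PySem.Set.ofList R).length) 0).map (fun c : Nat => (c : Int)) := by
      rw [List.map_append, List.map_map, List.map_replicate, hKR]
      rfl
    rw [e1, e2]
    exact hpermNat.map _
  -- entries of countsB are positive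
  have hpos : ∀ c ∈ countsB, (1 : Int) ≤ c := by
    intro c hc
    obtain ⟨v, hv, rfl⟩ := List.mem_map.mp hc
    have hvlab : v ∈ lab := (PySem.Set.mem_ofList lab v).mp hv
    have : 0 < lab.count v := List.count_pos_iff.mpr hvlab
    omega
  -- sorted lists
  set sizes := PySem.List.sorted countsB (fun v => v) true with hsizes
  have hsizeslen : sizes.length = K := by
    rw [hsizes, PySem.List.length_sorted, hcountsB]
    simp [hK]
  have hsorted_eq : PySem.List.sorted comp (fun v => v) true =
      sizes ++ List.replicate (n - K) (0 : Int) := by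
    apply PySem.List.eq_of_perm_of_pairwise_le_of_injective (fun v : Int => -v) neg_injective
    · exact ((PySem.List.sorted_perm comp (fun v => v) true).trans hperm).trans
        (((PySem.List.sorted_perm countsB (fun v => v) true).symm).append_right _)
    · exact (PySem.List.sorted_pairwise_rev comp (fun v => v)).imp (by intro a b h; omega)
    · rw [List.pairwise_append]
      refine ⟨(PySem.List.sorted_pairwise_rev countsB (fun v => v)).imp (by intro a b h; omega),
        List.Pairwise.imp (by intro a b h; omega) (List.pairwise_replicate.mpr (by simp)), ?_⟩
      intro a ha b hb
      have ha' : a ∈ countsB := (PySem.List.mem_sorted countsB (fun v => v) true a).mp ha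
      have hb' : b = 0 := List.eq_of_mem_replicate hb
      have := hpos a ha'
      omega
  have hsortlen : (PySem.List.sorted comp (fun v => v) true).length = n := by
    rw [PySem.List.length_sorted, hcomp_eq]
    simp
  have hKlen : K + (n - K) = n := by
    have := hsorted_eq ▸ hsortlen
    rw [List.length_append, hsizeslen, List.length_replicate] at this
    omega
  rw [hcnt, hvals, ← hsizes, hsorted_eq]
  -- final arithmetic, by cases on n and K
  rcases Nat.lt_or_ge n 2 with hn2 | hn2
  · rcases Nat.eq_or_lt_of_le (Nat.zero_le n) with hn0 | hn1
    · -- n = 0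
      have hn0' : n = 0 := hn0.symm
      have hK0 : K = 0 := by omega
      have hsz : sizes = [] := List.eq_nil_of_length_eq_zero (by rw [hsizeslen]; omega)
      rw [if_pos (by rw [List.length_append, hsizeslen, List.length_replicate]; omega)]
      rw [hsz]
      simp [hn0']
    · -- n = 1
      have hn1' : n = 1 := by omega
      have hK1 : K = 1 := by
        have hKge : 1 ≤ K := by
          have hlabne : lab ≠ [] := by
            intro h
            rw [h] at h9
            simp at h9
            omega
          obtain ⟨a, ha⟩ := List.exists_mem_of_ne_nil lab hlabne
          have hmem : a ∈ PySem.Set.ofList lab := (PySem.Set.mem_ofList lab a).mpr ha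
          have := List.length_pos_of_mem hmem
          omega
        omega
      obtain ⟨c, hc⟩ := List.length_eq_one_iff.mp (by rw [hsizeslen, hK1] : sizes.length = 1)
      have hcmem : c ∈ countsB := by
        have hcin : c ∈ sizes := by rw [hc]; simp
        exact (PySem.List.mem_sorted countsB (fun v => v) true c).mp hcin
      have hc1 : (1 : Int) ≤ c := hpos c hcmem
      have hcle : c ≤ 1 := by
        obtain ⟨v, hv, rfl⟩ := List.mem_map.mp hcmem
        have hcl := List.count_le_length (l := lab) (a := v)
        rw [h9] at hcl
        have hc2 : List.count v lab ≤ 1 := by omega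
        exact_mod_cast hc2
      have hceq : c = 1 := le_antisymm hcle hc1
      rw [if_pos (by rw [List.length_append, hsizeslen, List.length_replicate]; omega)]
      rw [hc]
      simp [hceq, hn1']
  · -- n ≥ 2
    have hKge : 1 ≤ K := by
      have hlabne : lab ≠ [] := by
        intro h
        rw [h] at h9
        simp at h9
        omega
      obtain ⟨a, ha⟩ := List.exists_mem_of_ne_nil lab hlabne
      have hmem : a ∈ PySem.Set.ofList lab := (PySem.Set.mem_ofList lab a).mpr ha
      have := List.length_pos_of_mem hmem
      omega
    rw [if_neg (by rw [List.length_append, hsizeslen, List.length_replicate]; omega)]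
    have hfirst : (sizes ++ List.replicate (n - K) (0 : Int)).getD 0 0 = sizes.getD 0 0 := by
      rw [List.getD_eq_getElem?_getD, List.getD_eq_getElem?_getD,
        List.getElem?_append_left (by rw [hsizeslen]; omega)]
    rw [hfirst, if_pos (by rw [hsizeslen]; omega)]
    rcases Nat.lt_or_ge 1 K with hK2 | hK2
    · have hsecond : (sizes ++ List.replicate (n - K) (0 : Int)).getD 1 0 = sizes.getD 1 0 := by
        rw [List.getD_eq_getElem?_getD, List.getD_eq_getElem?_getD,
          List.getElem?_append_left (by rw [hsizeslen]; omega)]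
      rw [hsecond, if_pos (by rw [hsizeslen]; omega)]
    · have hK1 : K = 1 := by omega
      have hsecond : (sizes ++ List.replicate (n - K) (0 : Int)).getD 1 0 = 0 := by
        rw [List.getD_eq_getElem?_getD,
          List.getElem?_append_right (by rw [hsizeslen]; omega)]
        rw [hsizeslen, hK1]
        simp [show 0 < n - 1 by omega]
      rw [hsecond, if_neg (by rw [hsizeslen]; omega)]
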